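-- pv_equiv track=rewrite | github.com/ata-turhan/Leetcode-Solutions | 2674-make-the-prefix-sum-non-negative/make-the-prefix-sum-non-negative.py | makePrefSumNonNegative
-- ===== SOURCE A (Python) =====
-- import heapq
-- from typing import List
--
-- def makePrefSumNonNegative(nums: List[int]) -> int:
--     # Initialize a min heap, cumulative sum, and count for negative sums
--     min_heap = []
--     cumulative_sum = 0
--     negative_count = 0
--
--     # Iterate through the numbers in the input list
--     for num in nums:
--         # Add the current number to the cumulative sum
--         cumulative_sum += num
--         # Push the current number onto the min heap
--         heapq.heappush(min_heap, num)
--         # Check if the cumulative sum becomes negative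
--         if cumulative_sum < 0:
--             # If so, pop the smallest number from the heap
--             min_num = heapq.heappop(min_heap)
--             # Subtract the popped number from the cumulative sum
--             cumulative_sum -= min_num
--             # Increment the count of negative sums
--             negative_count += 1
--
--     # Return the count of negative sums
--     return negative_count
-- ===== SOURCE B (Python) =====
-- def makePrefSumNonNegative(nums):
--     # Plain-list variant: keep the not-yet-removed elements in a list and,
--     # when the prefix sum goes negative, drop the minimum found by a scan.
--     seen = []
--     cumulative_sum = 0
--     removals = 0
--     for num in nums:
--         cumulative_sum += num
--         seen.append(num)
--         if cumulative_sum < 0: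
--             smallest = min(seen)
--             seen.remove(smallest)
--             cumulative_sum -= smallest
--             removals += 1
--     return removals
-- ===== Notes on version B (the rewrite author's own statement) =====
-- stated objective: simpler
-- what changed: Replaces the heapq priority queue with a plain list of the kept elements, finding the element to drop by a min scan and list.remove when the prefix sum goes negative.
import Mathlib
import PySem

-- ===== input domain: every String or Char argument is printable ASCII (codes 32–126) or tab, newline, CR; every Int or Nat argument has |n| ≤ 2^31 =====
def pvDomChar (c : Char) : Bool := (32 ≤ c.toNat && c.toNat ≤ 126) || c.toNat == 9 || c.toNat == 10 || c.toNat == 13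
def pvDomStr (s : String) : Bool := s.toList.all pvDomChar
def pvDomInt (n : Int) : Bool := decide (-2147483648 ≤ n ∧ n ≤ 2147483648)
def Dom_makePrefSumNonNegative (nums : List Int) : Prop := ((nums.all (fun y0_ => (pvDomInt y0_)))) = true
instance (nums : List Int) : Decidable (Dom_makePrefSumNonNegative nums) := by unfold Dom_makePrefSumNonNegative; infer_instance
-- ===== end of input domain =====

-- B replaces A's heapq priority queue with a plain list scanned for its minimum; equal return values proved.


-- ===== PORT A =====
-- heapq._siftdown(heap, startpos, pos) with the pending item passed explicitly:
-- the while loop 'while pos > startpos: parent = (pos-1)>>1; …' becomes recursion on pos.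
-- (All list indices touched are in range during A's execution; getD 0 is the total reading of heap[i].)
def pySiftdown (heap : List Int) (startpos pos : Nat) (item : Int) : List Int :=
  if _h : startpos < pos then
    let parentpos := (pos - 1) / 2
    let parent := heap.getD parentpos 0
    if item < parent then
      pySiftdown (heap.set pos parent) startpos parentpos item
    else
      heap.set pos item
  else
    heap.set pos item
termination_by pos
decreasing_by omega

-- heapq.heappush: heap.append(item); _siftdown(heap, 0, len(heap)-1)
def pyHeappush (heap : List Int) (item : Int) : List Int :=
  pySiftdown (heap ++ [item]) 0 heap.length item

-- heapq._siftup(heap, pos) body: the 'while childpos < endpos' loop, then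
-- 'heap[pos] = newitem; _siftdown(heap, startpos, pos)'.
def pySiftupLoop (heap : List Int) (startpos pos : Nat) (newitem : Int) : List Int :=
  if _h : 2 * pos + 1 < heap.length then
    let childpos :=
      if 2 * pos + 2 < heap.length ∧ ¬ heap.getD (2 * pos + 1) 0 < heap.getD (2 * pos + 2) 0
      then 2 * pos + 2 else 2 * pos + 1
    pySiftupLoop (heap.set pos (heap.getD childpos 0)) startpos childpos newitem
  else
    pySiftdown (heap.set pos newitem) startpos pos newitem
termination_by heap.length - pos
decreasing_by simp only [List.length_set]; split <;> omega

-- heapq.heappop (A only ever pops a non-empty heap, so the [] branch is unreachable there)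
def pyHeappop (heap : List Int) : Int × List Int :=
  let lastelt := heap.getLastD 0
  let rest := heap.dropLast
  if rest.isEmpty then (lastelt, [])
  else (rest.getD 0 0, pySiftupLoop (rest.set 0 lastelt) 0 0 lastelt)

def makePrefSumNonNegative (nums : List Int) : Int :=
  (nums.foldl (fun (st : List Int × Int × Int) num =>
      let cumulative_sum := st.2.1 + num
      let min_heap := pyHeappush st.1 num
      if cumulative_sum < 0 then
        let p := pyHeappop min_heap
        (p.2, cumulative_sum - p.1, st.2.2 + 1)
      else
        (min_heap, cumulative_sum, st.2.2)) ([], 0, 0)).2.2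

-- ===== PORT B =====
def makePrefSumNonNegative_alt (nums : List Int) : Int :=
  (nums.foldl (fun (st : List Int × Int × Int) num =>
      let cumulative_sum := st.2.1 + num
      let seen := st.1 ++ [num]
      if cumulative_sum < 0 then
        -- seen is non-empty here, so min() cannot raise and remove() always finds its value
        let smallest := (PySem.List.min? seen (fun x => x)).getD 0
        ((PySem.List.remove? seen smallest).getD seen, cumulative_sum - smallest, st.2.2 + 1)
      else
        (seen, cumulative_sum, st.2.2)) ([], 0, 0)).2.2

-- ===== PRECONDITION & SPEC =====
def Spec_makePrefSumNonNegative (nums : List Int) (out : Int) : Prop := out = makePrefSumNonNegative_alt nums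
instance (nums : List Int) (out : Int) : Decidable (Spec_makePrefSumNonNegative nums out) := by unfold Spec_makePrefSumNonNegative; infer_instance

-- ===== CLAIM (what is proved, stated in full; the proofs are below) =====
def Claim_equal_makePrefSumNonNegative : Prop := ∀ (nums : List Int), Dom_makePrefSumNonNegative nums → Spec_makePrefSumNonNegative nums (makePrefSumNonNegative nums)

-- ===== LEMMAS AND PROOFS =====

-- Min-heap property on the array encoding: every non-root entry dominates its parent.
def IsHeap (l : List Int) : Prop :=
  ∀ j : Nat, 0 < j → j < l.length → l.getD ((j - 1) / 2) 0 ≤ l.getD j 0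

theorem getD_set_eq (l : List Int) (i : Nat) (x : Int) (h : i < l.length) :
    (l.set i x).getD i 0 = x := by
  simp [List.getD_eq_getElem?_getD, h]

theorem getD_set_ne (l : List Int) (i j : Nat) (x : Int) (h : i ≠ j) :
    (l.set i x).getD j 0 = l.getD j 0 := by
  simp [List.getD_eq_getElem?_getD, List.getElem?_set_ne h]

theorem set_move_perm (l : List Int) (i j : Nat) (x : Int)
    (hi : i < l.length) (hj : j < l.length) (hij : i ≠ j) :
    ((l.set i (l.getD j 0)).set j x).Perm (l.set i x) := by
  have hi' : i < (l.set i x).length := by simpa using hi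
  have hj' : j < (l.set i x).length := by simpa using hj
  have h := List.set_set_perm (as := l.set i x) hi' hj'
  have e1 : (l.set i x)[j] = l.getD j 0 := by
    rw [List.getElem_set_ne (by omega)]
    simp [List.getD_eq_getElem?_getD, List.getElem?_eq_getElem hj]
  have e2 : (l.set i x)[i] = x := List.getElem_set_self hi'
  rw [e1, e2, List.set_set] at h
  exact h

theorem sd_perm (pos : Nat) : ∀ (heap : List Int) (item : Int), pos < heap.length →
    (pySiftdown heap 0 pos item).Perm (heap.set pos item) := by
  induction pos using Nat.strong_induction_on with
  | _ pos ih =>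
    intro heap item h
    rw [pySiftdown]
    split
    · rename_i hpos
      show (if item < heap.getD ((pos - 1) / 2) 0 then
          pySiftdown (heap.set pos (heap.getD ((pos - 1) / 2) 0)) 0 ((pos - 1) / 2) item
        else heap.set pos item).Perm (heap.set pos item)
      split
      · rename_i hlt
        refine List.Perm.trans (ih ((pos - 1) / 2) (by omega) _ item (by simp; omega)) ?_
        exact set_move_perm heap pos ((pos - 1) / 2) item h (by omega) (by omega)
      · exact List.Perm.refl _
    · exact List.Perm.refl _

theorem sd_heap (pos : Nat) : ∀ (heap : List Int) (item : Int), pos < heap.length →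
    (∀ j, 0 < j → j < heap.length → j ≠ pos →
      (heap.set pos item).getD ((j - 1) / 2) 0 ≤ (heap.set pos item).getD j 0) →
    (∀ j, 0 < j → j < heap.length → (j - 1) / 2 = pos → 0 < pos →
      heap.getD ((pos - 1) / 2) 0 ≤ heap.getD j 0) →
    IsHeap (pySiftdown heap 0 pos item) := by
  induction pos using Nat.strong_induction_on with
  | _ pos ih =>
    intro heap item h H1 H2
    rw [pySiftdown]
    split
    · rename_i hpos
      show IsHeap (if item < heap.getD ((pos - 1) / 2) 0 then
          pySiftdown (heap.set pos (heap.getD ((pos - 1) / 2) 0)) 0 ((pos - 1) / 2) item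
        else heap.set pos item)
      set pp := (pos - 1) / 2 with hpp
      set pv := heap.getD pp 0 with hpv
      have hpplt : pp < pos := by omega
      split
      · rename_i hlt
        -- recursive case
        apply ih pp hpplt
        · simp; omega
        · -- H1'
          intro j hj hlen hne
          simp only [List.length_set] at hlen
          have hM : ∀ k, k ≠ pos → k ≠ pp → ((heap.set pos pv).set pp item).getD k 0 = heap.getD k 0 := by
            intro k hk1 hk2
            rw [getD_set_ne _ _ _ _ (by omega), getD_set_ne _ _ _ _ (by omega)]
          have hMpp : ((heap.set pos pv).set pp item).getD pp 0 = item :=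
            getD_set_eq _ _ _ (by simp; omega)
          have hMpos : ((heap.set pos pv).set pp item).getD pos 0 = pv := by
            rw [getD_set_ne _ _ _ _ (by omega), getD_set_eq _ _ _ h]
          by_cases hjpos : j = pos
          · subst hjpos
            rw [← hpp, hMpp, hMpos]
            exact hlt.le
          · have hJj : (heap.set pos item).getD j 0 = heap.getD j 0 := getD_set_ne _ _ _ _ (by omega)
            by_cases hpj : (j - 1) / 2 = pos
            · rw [hpj, hMpos, hM j hjpos hne]
              exact H2 j hj hlen hpj hpos
            · by_cases hpj2 : (j - 1) / 2 = pp
              · rw [hpj2, hMpp, hM j hjpos hne]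
                have := H1 j hj hlen hjpos
                rw [hJj, getD_set_ne _ _ _ _ (by omega), hpj2, ← hpv] at this
                exact hlt.le.trans this
              · rw [hM _ hpj hpj2, hM j hjpos hne]
                have := H1 j hj hlen hjpos
                rwa [hJj, getD_set_ne _ _ _ _ (by omega)] at this
        · -- H2'
          intro j hj hlen hpj hppz
          simp only [List.length_set] at hlen
          have hgp : (pp - 1) / 2 ≠ pos := by omega
          rw [getD_set_ne _ _ _ _ (by omega)]
          have hA : heap.getD ((pp - 1) / 2) 0 ≤ pv := by
            have := H1 pp hppz (by omega) (by omega)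
            rwa [getD_set_ne _ _ _ _ (by omega), getD_set_ne _ _ _ _ (by omega)] at this
          by_cases hjpos : j = pos
          · subst hjpos
            rw [getD_set_eq _ _ _ h]
            exact hA
          · rw [getD_set_ne _ _ _ _ (by omega)]
            have := H1 j hj hlen hjpos
            rw [getD_set_ne _ _ _ _ (by omega), getD_set_ne _ _ _ _ (by omega), hpj, ← hpv] at this
            exact hA.trans this
      · rename_i hge
        intro j hj hlen
        simp only [List.length_set] at hlen
        by_cases hjpos : j = pos
        · subst hjpos
          rw [getD_set_ne _ _ _ _ (by omega), getD_set_eq _ _ _ h, ← hpp, ← hpv]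
          omega
        · exact H1 j hj hlen hjpos
    · rename_i hz
      intro j hj hlen
      simp only [List.length_set] at hlen
      exact H1 j hj hlen (by omega)

theorem su_perm (n : Nat) : ∀ (heap : List Int) (pos : Nat) (newitem : Int),
    heap.length - pos = n → pos < heap.length →
    (pySiftupLoop heap 0 pos newitem).Perm (heap.set pos newitem) := by
  induction n using Nat.strong_induction_on with
  | _ n ih =>
    intro heap pos newitem hn h
    rw [pySiftupLoop]
    split
    · rename_i hguard
      show (pySiftupLoop (heap.set pos (heap.getD (if 2 * pos + 2 < heap.length ∧ ¬ heap.getD (2 * pos + 1) 0 < heap.getD (2 * pos + 2) 0 then 2 * pos + 2 else 2 * pos + 1) 0)) 0 (if 2 * pos + 2 < heap.length ∧ ¬ heap.getD (2 * pos + 1) 0 < heap.getD (2 * pos + 2) 0 then 2 * pos + 2 else 2 * pos + 1) newitem).Perm _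
      split
      · rename_i hc
        refine List.Perm.trans (ih (heap.length - (2 * pos + 2)) (by omega) _ _ newitem (by simp) (by simp; omega)) ?_
        exact set_move_perm heap pos (2 * pos + 2) newitem h (by omega) (by omega)
      · rename_i hc
        refine List.Perm.trans (ih (heap.length - (2 * pos + 1)) (by omega) _ _ newitem (by simp) (by simp; omega)) ?_
        exact set_move_perm heap pos (2 * pos + 1) newitem h (by omega) (by omega)
    · rename_i hguard
      have := sd_perm pos (heap.set pos newitem) newitem (by simp; omega)
      rwa [List.set_set] at this

theorem su_heap (n : Nat) : ∀ (heap : List Int) (pos : Nat) (newitem : Int),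
    heap.length - pos = n → pos < heap.length →
    (∀ j, 0 < j → j < heap.length → j ≠ pos → (j - 1) / 2 ≠ pos →
      heap.getD ((j - 1) / 2) 0 ≤ heap.getD j 0) →
    (∀ j, 0 < pos → j < heap.length → (j - 1) / 2 = pos →
      heap.getD ((pos - 1) / 2) 0 ≤ heap.getD j 0) →
    IsHeap (pySiftupLoop heap 0 pos newitem) := by
  induction n using Nat.strong_induction_on with
  | _ n ih =>
    intro heap pos newitem hn h Hole1 Hole2
    rw [pySiftupLoop]
    split
    · rename_i hguard
      show IsHeap (pySiftupLoop (heap.set pos (heap.getD (if 2 * pos + 2 < heap.length ∧ ¬ heap.getD (2 * pos + 1) 0 < heap.getD (2 * pos + 2) 0 then 2 * pos + 2 else 2 * pos + 1) 0)) 0 (if 2 * pos + 2 < heap.length ∧ ¬ heap.getD (2 * pos + 1) 0 < heap.getD (2 * pos + 2) 0 then 2 * pos + 2 else 2 * pos + 1) newitem)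
      -- uniform treatment of the chosen child c
      have main : ∀ c : Nat, c = 2 * pos + 1 ∨ c = 2 * pos + 2 → c < heap.length →
          (∀ s, (s = 2 * pos + 1 ∨ s = 2 * pos + 2) → s < heap.length → heap.getD c 0 ≤ heap.getD s 0) →
          IsHeap (pySiftupLoop (heap.set pos (heap.getD c 0)) 0 c newitem) := by
        intro c hcdef hclen hmin
        apply ih (heap.length - c) (by omega) _ _ _ (by simp) (by simp; omega)
        · -- Hole1'
          intro j hj hlen hne hpne
          simp only [List.length_set] at hlen
          by_cases hjpos : j = pos
          · subst hjpos
            have hppne : (j - 1) / 2 ≠ j := by omega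
            rw [getD_set_ne _ _ _ _ (by omega), getD_set_eq _ _ _ h]
            exact Hole2 c (by omega) hclen (by omega)
          · by_cases hpj : (j - 1) / 2 = pos
            · -- j is the sibling of c (j ≠ c)
              rw [hpj, getD_set_eq _ _ _ h, getD_set_ne _ _ _ _ (by omega)]
              exact hmin j (by omega) hlen
            · rw [getD_set_ne _ _ _ _ (by omega), getD_set_ne _ _ _ _ (by omega)]
              exact Hole1 j hj hlen hjpos hpj
        · -- Hole2'
          intro j _ hlen hpj
          simp only [List.length_set] at hlen
          have hcp : (c - 1) / 2 = pos := by omega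
          have hjne : j ≠ pos := by omega
          rw [hcp, getD_set_eq _ _ _ h, getD_set_ne _ _ _ _ (by omega)]
          have := Hole1 j (by omega) hlen hjne (by omega)
          rwa [hpj] at this
      split
      · rename_i hc
        refine main (2 * pos + 2) (Or.inr rfl) (by omega) ?_
        intro s hs hslen
        rcases hs with hs | hs <;> subst hs
        · omega
        · exact le_refl _
      · rename_i hc
        refine main (2 * pos + 1) (Or.inl rfl) (by omega) ?_
        intro s hs hslen
        rcases hs with hs | hs <;> subst hs
        · exact le_refl _
        · have : heap.getD (2 * pos + 1) 0 < heap.getD (2 * pos + 2) 0 := by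
            by_contra hcon
            exact hc ⟨hslen, hcon⟩
          exact this.le
    · rename_i hguard
      apply sd_heap pos _ newitem (by simp; omega)
      · intro j hj hlen hne
        simp only [List.length_set] at hlen
        rw [List.set_set]
        have hpne : (j - 1) / 2 ≠ pos := by omega
        rw [getD_set_ne _ _ _ _ (by omega), getD_set_ne _ _ _ _ (by omega)]
        exact Hole1 j hj hlen hne hpne
      · intro j hj hlen hpj _
        simp only [List.length_set] at hlen
        omega

theorem getD_append_left (l t : List Int) (j : Nat) (h : j < l.length) :
    (l ++ t).getD j 0 = l.getD j 0 := by
  simp [List.getD_eq_getElem?_getD, List.getElem?_append_left h]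

theorem getD_dropLast (l : List Int) (j : Nat) (h : j < l.dropLast.length) :
    l.dropLast.getD j 0 = l.getD j 0 := by
  have h2 : j < l.length := by simp at h; omega
  rw [List.getD_eq_getElem?_getD, List.getD_eq_getElem?_getD, List.getElem?_eq_getElem h,
    List.getElem?_eq_getElem h2, Option.getD_some, Option.getD_some, List.getElem_dropLast]

theorem push_perm (heap : List Int) (x : Int) : (pyHeappush heap x).Perm (heap ++ [x]) := by
  have h := sd_perm heap.length (heap ++ [x]) x (by simp)
  rwa [List.set_append, if_neg (by omega), Nat.sub_self, List.set_cons_zero] at h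

theorem push_heap (heap : List Int) (x : Int) (hh : IsHeap heap) : IsHeap (pyHeappush heap x) := by
  apply sd_heap heap.length (heap ++ [x]) x (by simp)
  · intro j hj hlen hne
    simp only [List.length_append, List.length_cons, List.length_nil] at hlen
    have hjl : j < heap.length := by omega
    rw [List.set_append, if_neg (by omega), Nat.sub_self, List.set_cons_zero]
    rw [getD_append_left _ _ _ (by omega), getD_append_left _ _ _ hjl]
    exact hh j hj hjl
  · intro j hj hlen hpj _
    simp only [List.length_append, List.length_cons, List.length_nil] at hlen
    omega

theorem root_min (l : List Int) (h : IsHeap l) : ∀ y ∈ l, l.getD 0 0 ≤ y := by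
  have key : ∀ j, j < l.length → l.getD 0 0 ≤ l.getD j 0 := by
    intro j
    induction j using Nat.strong_induction_on with
    | _ j ih =>
      intro hj
      rcases Nat.eq_zero_or_pos j with hz | hpos
      · subst hz; exact le_refl _
      · exact (ih ((j - 1) / 2) (by omega) (by omega)).trans (h j hpos hj)
  intro y hy
  obtain ⟨j, hj, rfl⟩ := List.mem_iff_getElem.mp hy
  have e : l.getD j 0 = l[j] := by
    rw [List.getD_eq_getElem?_getD, List.getElem?_eq_getElem hj, Option.getD_some]
  rw [← e]
  exact key j hj

theorem pop_fst (heap : List Int) (h : heap ≠ []) : (pyHeappop heap).1 = heap.getD 0 0 := by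
  unfold pyHeappop
  show (if heap.dropLast.isEmpty then (heap.getLastD 0, ([] : List Int))
    else (heap.dropLast.getD 0 0,
      pySiftupLoop (heap.dropLast.set 0 (heap.getLastD 0)) 0 0 (heap.getLastD 0))).1 = heap.getD 0 0
  split
  · rename_i hemp
    simp only [List.isEmpty_iff] at hemp
    have hlen : heap.length = 1 := by
      have := congrArg List.length hemp
      simp at this
      have := List.length_pos_of_ne_nil h
      omega
    rw [List.getLastD_eq_getLast?, List.getLast?_eq_getElem?, hlen]
    simp [List.getD_eq_getElem?_getD]
  · rename_i hemp
    simp only [List.isEmpty_iff] at hemp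
    exact getD_dropLast heap 0 (List.length_pos_of_ne_nil hemp)

theorem pop_perm (heap : List Int) (h : heap ≠ []) :
    (pyHeappop heap).2.Perm (heap.erase (heap.getD 0 0)) := by
  unfold pyHeappop
  show (if heap.dropLast.isEmpty then (heap.getLastD 0, ([] : List Int))
    else (heap.dropLast.getD 0 0,
      pySiftupLoop (heap.dropLast.set 0 (heap.getLastD 0)) 0 0 (heap.getLastD 0))).2.Perm (heap.erase (heap.getD 0 0))
  split
  · rename_i hemp
    simp only [List.isEmpty_iff] at hemp
    have hlen : heap.length = 1 := by
      have := congrArg List.length hemp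
      simp at this
      have := List.length_pos_of_ne_nil h
      omega
    obtain ⟨a, rfl⟩ := List.length_eq_one_iff.mp hlen
    simp [List.getD]
  · rename_i hemp
    simp only [List.isEmpty_iff] at hemp
    have hlen0 : 0 < heap.dropLast.length := List.length_pos_of_ne_nil hemp
    have hsu := su_perm (heap.dropLast.length) ((heap.dropLast).set 0 (heap.getLastD 0)) 0
      (heap.getLastD 0) (by simp) (by simpa using hlen0)
    rw [List.set_set] at hsu
    refine hsu.trans ?_
    -- heap = a :: t with t ≠ []
    obtain ⟨a, t, rfl⟩ : ∃ a t, heap = a :: t := by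
      cases heap with
      | nil => exact absurd rfl h
      | cons a t => exact ⟨a, t, rfl⟩
    have ht : t ≠ [] := by
      intro hnil; subst hnil; simp at hemp
    have hd : (a :: t).dropLast = a :: t.dropLast := by
      cases t with
      | nil => exact absurd rfl ht
      | cons b u => rfl
    have hlast : (a :: t).getLastD 0 = t.getLast ht := by
      rw [List.getLastD_eq_getLast?, List.getLast?_eq_some_getLast h, Option.getD_some]
      exact List.getLast_cons ht
    have hget : (a :: t).getD 0 0 = a := rfl
    rw [hd, hlast, hget, List.set_cons_zero, List.erase_cons_head]
    calc (t.getLast ht :: t.dropLast).Perm (t.dropLast ++ [t.getLast ht]) :=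
          (List.perm_append_singleton _ _).symm
      _ = t := List.dropLast_append_getLast ht

theorem pop_heap (heap : List Int) (_h : heap ≠ []) (hh : IsHeap heap) :
    IsHeap (pyHeappop heap).2 := by
  unfold pyHeappop
  show IsHeap (if heap.dropLast.isEmpty then (heap.getLastD 0, ([] : List Int))
    else (heap.dropLast.getD 0 0,
      pySiftupLoop (heap.dropLast.set 0 (heap.getLastD 0)) 0 0 (heap.getLastD 0))).2
  split
  · intro j hj hlen
    simp at hlen
  · rename_i hemp
    simp only [List.isEmpty_iff] at hemp
    have hlen0 : 0 < heap.dropLast.length := List.length_pos_of_ne_nil hemp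
    apply su_heap (heap.dropLast.length) _ 0 _ (by simp) (by simpa using hlen0)
    · intro j hj hlen hne hpne
      simp only [List.length_set] at hlen
      rw [getD_set_ne _ _ _ _ (by omega), getD_set_ne _ _ _ _ (by omega),
        getD_dropLast _ _ hlen, getD_dropLast _ _ (by simp at hlen ⊢; omega)]
      exact hh j hj (by simp at hlen; omega)
    · intro j hj _ _
      omega

theorem loop_eq (nums : List Int) :
    ∀ (heap seen : List Int) (csum cnt : Int), heap.Perm seen → IsHeap heap →
    (nums.foldl (fun (st : List Int × Int × Int) num =>
      let cumulative_sum := st.2.1 + num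
      let min_heap := pyHeappush st.1 num
      if cumulative_sum < 0 then
        let p := pyHeappop min_heap
        (p.2, cumulative_sum - p.1, st.2.2 + 1)
      else
        (min_heap, cumulative_sum, st.2.2)) (heap, csum, cnt)).2.2 =
    (nums.foldl (fun (st : List Int × Int × Int) num =>
      let cumulative_sum := st.2.1 + num
      let seen := st.1 ++ [num]
      if cumulative_sum < 0 then
        let smallest := (PySem.List.min? seen (fun x => x)).getD 0
        ((PySem.List.remove? seen smallest).getD seen, cumulative_sum - smallest, st.2.2 + 1)
      else
        (seen, cumulative_sum, st.2.2)) (seen, csum, cnt)).2.2 := by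
  induction nums with
  | nil => intro heap seen csum cnt _ _; rfl
  | cons num rest ih =>
    intro heap seen csum cnt hperm hheap
    simp only [List.foldl_cons]
    have hperm' : (pyHeappush heap num).Perm (seen ++ [num]) :=
      (push_perm heap num).trans (hperm.append_right [num])
    have hheap' : IsHeap (pyHeappush heap num) := push_heap heap num hheap
    have hne' : pyHeappush heap num ≠ [] := by
      apply List.ne_nil_of_length_pos
      rw [hperm'.length_eq]
      simp
    by_cases hneg : csum + num < 0
    · obtain ⟨m, hm⟩ : ∃ m, PySem.List.min? (seen ++ [num]) (fun x => x) = some m := by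
        cases he : PySem.List.min? (seen ++ [num]) (fun x => x) with
        | none => exact absurd ((PySem.List.min?_eq_none_iff _ _).mp he) (by simp)
        | some m => exact ⟨m, rfl⟩
      have hmmem : m ∈ seen ++ [num] := PySem.List.min?_mem hm
      have hrootmem : (pyHeappush heap num).getD 0 0 ∈ pyHeappush heap num := by
        have hl : 0 < (pyHeappush heap num).length := List.length_pos_of_ne_nil hne'
        rw [List.getD_eq_getElem?_getD, List.getElem?_eq_getElem hl, Option.getD_some]
        exact List.getElem_mem hl
      have hm_eq : m = (pyHeappush heap num).getD 0 0 :=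
        le_antisymm (PySem.List.min?_isMin hm _ (hperm'.mem_iff.mp hrootmem))
          (root_min _ hheap' m (hperm'.mem_iff.mpr hmmem))
      have hrem : PySem.List.remove? (seen ++ [num]) m = some ((seen ++ [num]).erase m) :=
        PySem.List.remove?_eq_some_erase _ m hmmem
      simp only [if_pos hneg, hm, Option.getD_some, hrem, pop_fst _ hne', ← hm_eq]
      apply ih
      · exact ((pop_perm _ hne').trans (by rw [← hm_eq]; exact hperm'.erase m))
      · exact pop_heap _ hne' hheap'
    · simp only [if_neg hneg]
      exact ih _ _ _ _ hperm' hheap'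

-- ===== VERDICT (by name: the statement is the Claim_ definition above) =====
theorem makePrefSumNonNegative_spec : Claim_equal_makePrefSumNonNegative := by
  intro nums _
  unfold Spec_makePrefSumNonNegative makePrefSumNonNegative makePrefSumNonNegative_alt
  exact loop_eq nums [] [] 0 0 (List.Perm.refl []) (by intro j hj hlen; simp at hlen)
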